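-- pv_equiv track=rewrite | github.com/ITE-5th/arabic-ner | chunker/features_extractors/npchunk.py | tag_since_dt
-- ===== SOURCE A (Python) =====
-- def tag_since_dt(sentence, i):
--     tags = set()
--     for word, pos in sentence[:i]:
--         if pos in ["DT", "PUNC"]:
--             tags = set()
--         else:
--             tags.add(pos)
--
--     return '+'.join(sorted(tags))
-- ===== SOURCE B (Python) =====
-- def tag_since_dt(sentence, i):
--     tags = set()
--     for word, pos in reversed(sentence[:i]):
--         if pos in ("DT", "PUNC"):
--             break
--         tags.add(pos)
--     return '+'.join(sorted(tags))
-- ===== Notes on version B (the rewrite author's own statement) =====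
-- stated objective: alternative
-- what changed: Replaces A's forward full pass over sentence[:i] with set-resets at every DT/PUNC by a reverse scan that adds tags and breaks at the first boundary encountered.
import Mathlib
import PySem

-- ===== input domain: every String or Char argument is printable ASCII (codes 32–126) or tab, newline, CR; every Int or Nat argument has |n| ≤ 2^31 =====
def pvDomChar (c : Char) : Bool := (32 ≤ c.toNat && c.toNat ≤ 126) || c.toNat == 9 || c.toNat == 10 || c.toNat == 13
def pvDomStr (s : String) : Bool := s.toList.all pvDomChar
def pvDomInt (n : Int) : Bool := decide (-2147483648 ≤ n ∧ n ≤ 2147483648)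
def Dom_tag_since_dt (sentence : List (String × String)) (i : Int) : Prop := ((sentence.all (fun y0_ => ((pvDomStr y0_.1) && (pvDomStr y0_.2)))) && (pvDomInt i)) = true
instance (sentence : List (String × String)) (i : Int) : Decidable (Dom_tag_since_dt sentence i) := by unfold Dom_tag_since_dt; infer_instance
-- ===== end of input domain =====

-- B replaces A's forward full pass with resets by an early-terminating reverse scan
-- that stops at the first DT/PUNC boundary (objective: alternative decomposition).

-- ===== PORT A =====
-- forward pass over sentence[:i]: reset the set on DT/PUNC, otherwise add pos
def tag_since_dt (sentence : List (String × String)) (i : Int) : String :=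
  let tags : PySem.Set String :=
    (PySem.List.slice sentence none (some i)).foldl
      (fun tags wp =>
        if wp.2 ∈ ["DT", "PUNC"] then PySem.Set.empty
        else PySem.Set.add tags wp.2)
      PySem.Set.empty
  PySem.Str.join "+" (PySem.List.sorted tags (fun x => x) false)

-- ===== PORT B =====
-- reverse scan with break: add pos until the first boundary is met
def tag_since_dt_altLoop : List (String × String) → PySem.Set String → PySem.Set String
  | [], tags => tags
  | (_, pos) :: rest, tags =>
    if pos ∈ ["DT", "PUNC"] then tags
    else tag_since_dt_altLoop rest (PySem.Set.add tags pos)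

def tag_since_dt_alt (sentence : List (String × String)) (i : Int) : String :=
  let tags : PySem.Set String :=
    tag_since_dt_altLoop (PySem.List.slice sentence none (some i)).reverse PySem.Set.empty
  PySem.Str.join "+" (PySem.List.sorted tags (fun x => x) false)

-- ===== PRECONDITION & SPEC =====
def Spec_tag_since_dt (sentence : List (String × String)) (i : Int) (out : String) : Prop := out = tag_since_dt_alt sentence i
instance (sentence : List (String × String)) (i : Int) (out : String) : Decidable (Spec_tag_since_dt sentence i out) := by unfold Spec_tag_since_dt; infer_instance

-- ===== CLAIM (what is proved, stated in full; the proofs are below) =====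
def Claim_equal_tag_since_dt : Prop := ∀ (sentence : List (String × String)) (i : Int), Dom_tag_since_dt sentence i → Spec_tag_since_dt sentence i (tag_since_dt sentence i)

-- ===== LEMMAS AND PROOFS =====

-- the pos tags since the last boundary, read off the reversed list
def pvSinceBoundary (l : List (String × String)) : List String :=
  (l.reverse.takeWhile (fun wp => !(wp.2 ∈ ["DT", "PUNC"] : Bool))).map (·.2)

lemma pvSinceBoundary_nil : pvSinceBoundary [] = [] := rfl

lemma pvSinceBoundary_append_singleton (l : List (String × String)) (w p : String) :
    pvSinceBoundary (l ++ [(w, p)]) =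
      if p ∈ ["DT", "PUNC"] then [] else p :: pvSinceBoundary l := by
  simp only [pvSinceBoundary, List.reverse_append, List.reverse_singleton,
    List.singleton_append, List.takeWhile_cons]
  by_cases h : p ∈ ["DT", "PUNC"] <;> simp [h]

-- B's loop is set-update along the pre-boundary prefix of the reversed list
lemma altLoop_eq (r : List (String × String)) (s : PySem.Set String) :
    tag_since_dt_altLoop r s =
      PySem.Set.update s ((r.takeWhile (fun wp => !(wp.2 ∈ ["DT", "PUNC"] : Bool))).map (·.2)) := by
  induction r generalizing s with
  | nil => rfl
  | cons hd tl ih =>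
    obtain ⟨w, p⟩ := hd
    by_cases h : p = "DT" ∨ p = "PUNC"
    · obtain h | h := h <;> simp [tag_since_dt_altLoop, h]
    · obtain ⟨h1, h2⟩ := not_or.mp h
      simp [tag_since_dt_altLoop, h1, h2, PySem.Set.update_cons, ih]

-- membership in A's forward fold = membership in the tags since the last boundary
lemma foldA_mem (l : List (String × String)) (x : String) :
    (x ∈ l.foldl
      (fun tags wp =>
        if wp.2 ∈ ["DT", "PUNC"] then PySem.Set.empty
        else PySem.Set.add tags wp.2)
      PySem.Set.empty) ↔ x ∈ pvSinceBoundary l := by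
  induction l using List.reverseRecOn with
  | nil => simp [pvSinceBoundary_nil, PySem.Set.empty]
  | append_singleton l e ih =>
    obtain ⟨w, p⟩ := e
    rw [List.foldl_append, pvSinceBoundary_append_singleton]
    simp only [List.foldl_cons, List.foldl_nil]
    by_cases h : p ∈ ["DT", "PUNC"]
    · rw [if_pos h, if_pos h]
      simp [PySem.Set.empty]
    · rw [if_neg h, if_neg h, PySem.Set.mem_add, ih, List.mem_cons]
      exact or_comm

-- A's forward fold has no duplicates
lemma foldA_nodup (l : List (String × String)) :
    (l.foldl
      (fun tags wp =>
        if wp.2 ∈ ["DT", "PUNC"] then PySem.Set.empty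
        else PySem.Set.add tags wp.2)
      PySem.Set.empty).Nodup := by
  induction l using List.reverseRecOn with
  | nil => simp [PySem.Set.empty]
  | append_singleton l e ih =>
    obtain ⟨w, p⟩ := e
    rw [List.foldl_append]
    by_cases h : p = "DT" ∨ p = "PUNC"
    · obtain h | h := h <;> simp [h, PySem.Set.empty]
    · obtain ⟨h1, h2⟩ := not_or.mp h
      simpa [h1, h2] using PySem.Set.nodup_add _ p ih

-- ===== VERDICT (by name: the statement is the Claim_ definition above) =====
theorem tag_since_dt_spec : Claim_equal_tag_since_dt := by
  intro sentence i _
  unfold Spec_tag_since_dt tag_since_dt tag_since_dt_alt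
  set l := PySem.List.slice sentence none (some i) with hl
  simp only [altLoop_eq, PySem.Set.update_empty]
  have hperm :
      (l.foldl
        (fun tags wp =>
          if wp.2 ∈ ["DT", "PUNC"] then PySem.Set.empty
          else PySem.Set.add tags wp.2)
        PySem.Set.empty).Perm
      (PySem.Set.ofList ((l.reverse.takeWhile (fun wp => !(wp.2 ∈ ["DT", "PUNC"] : Bool))).map (·.2))) := by
    rw [List.perm_ext_iff_of_nodup (foldA_nodup l) (PySem.Set.nodup_ofList _)]
    intro x
    rw [foldA_mem, PySem.Set.mem_ofList]
    rfl
  exact congrArg (PySem.Str.join "+")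
    (PySem.List.sorted_eq_sorted_of_perm _ _ _ (fun a b h => h) hperm)
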